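-- pv_equiv track=rewrite | github.com/jmliu88/fnn_on_mi | exp_framework.py | early_stop
-- ===== SOURCE A (Python) =====
-- def early_stop(valArray,NOT_BETTER_NUM = 10):
--     valArray = valArray[-NOT_BETTER_NUM:]
--     if len(valArray) < NOT_BETTER_NUM:
--         return False
--     else:
--         length = len(valArray)
--         for i,n in enumerate(valArray[length-NOT_BETTER_NUM:-2]):
--             if valArray[i]>valArray[i+1]:
--                 return False
--         return True
-- ===== SOURCE B (Python) =====
-- def early_stop(valArray, NOT_BETTER_NUM=10):
--     if len(valArray) < NOT_BETTER_NUM: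
--         return False
--     head = valArray[len(valArray) - NOT_BETTER_NUM:-1]
--     return sorted(head) == head
-- ===== Notes on version B (the rewrite author's own statement) =====
-- stated objective: idiomatic
-- what changed: Replaces A's double slicing plus index-based short-circuit pairwise loop by computing the window head slice once and comparing it with its sorted copy (sorted(head) == head).
import Mathlib
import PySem

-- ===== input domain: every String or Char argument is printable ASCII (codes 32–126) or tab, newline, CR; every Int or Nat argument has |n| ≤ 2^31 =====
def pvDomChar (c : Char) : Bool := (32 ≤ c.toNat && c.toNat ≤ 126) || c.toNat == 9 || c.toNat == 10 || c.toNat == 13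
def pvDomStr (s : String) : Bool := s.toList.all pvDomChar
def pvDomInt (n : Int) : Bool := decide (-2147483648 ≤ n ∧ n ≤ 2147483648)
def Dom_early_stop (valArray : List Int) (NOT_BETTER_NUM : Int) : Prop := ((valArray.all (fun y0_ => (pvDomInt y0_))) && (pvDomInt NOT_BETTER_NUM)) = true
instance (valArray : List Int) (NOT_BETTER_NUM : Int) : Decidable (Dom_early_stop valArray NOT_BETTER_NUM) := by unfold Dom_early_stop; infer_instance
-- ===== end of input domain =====

-- B replaces A's index-based short-circuit pairwise scan by slicing the window head once and
-- comparing it with its sorted copy (idiomatic sortedness check); equal return value on all inputs.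

-- ===== PORT A =====
-- the for-loop with early 'return False'; pyGetD is exact here: the loop only ever
-- indexes i and i+1 with 0 ≤ i < len(v)-2, always in range
def early_stop_loop (v : List Int) : List (Int × Int) → Bool
  | [] => true
  | (i, _) :: rest =>
      if PySem.List.pyGetD v i 0 > PySem.List.pyGetD v (i + 1) 0 then false
      else early_stop_loop v rest

def early_stop (valArray : List Int) (NOT_BETTER_NUM : Int) : Bool :=
  let v := PySem.List.slice valArray (some (-NOT_BETTER_NUM)) none
  if (v.length : Int) < NOT_BETTER_NUM then false
  else
    let length : Int := v.length
    early_stop_loop v (PySem.List.enumerate (PySem.List.slice v (some (length - NOT_BETTER_NUM)) (some (-2))))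

-- ===== PORT B =====
def early_stop_alt (valArray : List Int) (NOT_BETTER_NUM : Int) : Bool :=
  if (valArray.length : Int) < NOT_BETTER_NUM then false
  else
    let head := PySem.List.slice valArray (some ((valArray.length : Int) - NOT_BETTER_NUM)) (some (-1))
    PySem.List.sorted head (fun x => x) == head

-- ===== PRECONDITION & SPEC =====
def Spec_early_stop (valArray : List Int) (NOT_BETTER_NUM : Int) (out : Bool) : Prop := out = early_stop_alt valArray NOT_BETTER_NUM
instance (valArray : List Int) (NOT_BETTER_NUM : Int) (out : Bool) : Decidable (Spec_early_stop valArray NOT_BETTER_NUM out) := by unfold Spec_early_stop; infer_instance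

-- ===== CLAIM (what is proved, stated in full; the proofs are below) =====
def Claim_equal_early_stop : Prop := ∀ (valArray : List Int) (NOT_BETTER_NUM : Int), Dom_early_stop valArray NOT_BETTER_NUM → Spec_early_stop valArray NOT_BETTER_NUM (early_stop valArray NOT_BETTER_NUM)

-- ===== LEMMAS AND PROOFS =====

-- A's loop returns true iff every adjacent pair indexed by the enumerate list is ordered
theorem early_stop_loop_spec (v xs : List Int) (k : Nat) :
    early_stop_loop v (PySem.List.enumerate xs (k : Int)) = true ↔
      ∀ j : Nat, j < xs.length → v.getD (k + j) 0 ≤ v.getD (k + j + 1) 0 := by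
  induction xs generalizing k with
  | nil => simp [PySem.List.enumerate_nil, early_stop_loop]
  | cons x xs ih =>
    rw [PySem.List.enumerate_cons]
    have h1 : ((k : Int) + 1) = ((k + 1 : Nat) : Int) := by push_cast; ring
    simp only [early_stop_loop, h1, PySem.List.pyGetD_natCast]
    split_ifs with hc
    · refine ⟨fun h => absurd h (by simp), fun h => ?_⟩
      exact absurd (by simpa using h 0 (by simp)) (not_le.mpr hc)
    · rw [ih (k + 1)]
      constructor
      · intro h j hj
        cases j with
        | zero => simpa using not_lt.mp hc
        | succ j' =>
          have hj' : j' < xs.length := by simp at hj; omega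
          have := h j' hj'
          rw [show k + (j' + 1) = k + 1 + j' from by omega]
          exact this
      · intro h j hj
        have := h (j + 1) (by simp; omega)
        rw [show k + (j + 1) = k + 1 + j from by omega] at this
        exact this

-- sorted(h) == h iff h is pairwise non-decreasing
theorem sorted_beq_iff (h : List Int) :
    (PySem.List.sorted h (fun x => x) == h) = true ↔ h.Pairwise (· ≤ ·) := by
  rw [beq_iff_eq]
  constructor
  · intro he
    have := PySem.List.sorted_pairwise h (fun x => x)
    rw [he] at this
    exact this
  · intro hp
    exact PySem.List.sorted_eq_self_of_pairwise h (fun x => x) hp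

theorem pairwise_iff_adjacent (h : List Int) :
    h.Pairwise (· ≤ ·) ↔ ∀ i : Nat, i + 1 < h.length → h[i]! ≤ h[i+1]! := by
  rw [← List.isChain_iff_pairwise, List.isChain_iff_getElem]
  constructor
  · intro hc i hi
    rw [getElem!_pos h i (by omega), getElem!_pos h (i+1) hi]
    exact hc i hi
  · intro hc i hi
    have := hc i hi
    rwa [getElem!_pos h i (by omega), getElem!_pos h (i+1) hi] at this

-- head-of-window adjacency quantifier vs Pairwise on the head slice
theorem adjacent_take (v : List Int) :
    (∀ j : Nat, j < (v.take (v.length - 2)).length → v.getD j 0 ≤ v.getD (j + 1) 0) ↔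
    (v.take (v.length - 1)).Pairwise (· ≤ ·) := by
  rw [pairwise_iff_adjacent]
  have hlen2 : (v.take (v.length - 2)).length = v.length - 2 := by
    rw [List.length_take]; omega
  have hlen1 : (v.take (v.length - 1)).length = v.length - 1 := by
    rw [List.length_take]; omega
  constructor
  · intro h i hi
    rw [hlen1] at hi
    have := h i (by rw [hlen2]; omega)
    rw [List.getD_eq_getElem _ _ (by omega), List.getD_eq_getElem _ _ (by omega)] at this
    rw [getElem!_pos _ _ (by rw [hlen1]; omega), getElem!_pos _ _ (by rw [hlen1]; omega),
        List.getElem_take, List.getElem_take]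
    exact this
  · intro h j hj
    rw [hlen2] at hj
    have := h j (by rw [hlen1]; omega)
    rw [getElem!_pos _ _ (by rw [hlen1]; omega), getElem!_pos _ _ (by rw [hlen1]; omega),
        List.getElem_take, List.getElem_take] at this
    rw [List.getD_eq_getElem _ _ (by omega), List.getD_eq_getElem _ _ (by omega)]
    exact this

-- ===== VERDICT (by name: the statement is the Claim_ definition above) =====
theorem early_stop_spec : Claim_equal_early_stop := by
  intro valArray N _
  unfold Spec_early_stop early_stop early_stop_alt
  rw [PySem.List.slice_some_none]
  by_cases hbig : (valArray.length : Int) < N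
  · -- window shorter than NOT_BETTER_NUM: both guards fire, both return false
    have hc : PySem.List.clampIdx valArray.length (-N) = 0 := by
      simp only [PySem.List.clampIdx]; split_ifs <;> omega
    rw [hc]
    simp [hbig]
  · by_cases hpos : 1 ≤ N
    · -- main case: 1 ≤ N ≤ len
      have hNn : N ≤ (valArray.length : Int) := le_of_not_gt hbig
      set n := valArray.length with hn
      set m := N.toNat with hm
      have hm1 : 1 ≤ m := by omega
      have hmn : m ≤ n := by omega
      have hc : PySem.List.clampIdx n (-N) = n - m := by
        simp only [PySem.List.clampIdx]; split_ifs <;> omega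
      rw [hc]
      set v := valArray.drop (n - m) with hv
      have hvlen : v.length = m := by simp [hv]; omega
      have hguard : ¬ ((v.length : Int) < N) := by rw [hvlen]; omega
      rw [if_neg hguard, if_neg hbig]
      -- A's inner slice is v.take (m - 2)
      have hA : PySem.List.slice v (some ((v.length : Int) - N)) (some (-2)) = v.take (m - 2) := by
        simp only [PySem.List.slice, hvlen]
        have h0 : PySem.List.clampIdx m ((m : Int) - N) = 0 := by
          simp only [PySem.List.clampIdx]; split_ifs <;> omega
        have h2 : PySem.List.clampIdx m (-2) = m - 2 := by
          simp only [PySem.List.clampIdx]; split_ifs <;> omega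
        rw [h0, h2]
        simp
      -- B's head slice is v.take (m - 1)
      have hB : PySem.List.slice valArray (some ((n : Int) - N)) (some (-1)) = v.take (m - 1) := by
        simp only [PySem.List.slice]
        have ha : PySem.List.clampIdx valArray.length ((n : Int) - N) = n - m := by
          simp only [PySem.List.clampIdx]; split_ifs <;> omega
        have hb : PySem.List.clampIdx valArray.length (-1) = n - 1 := by
          simp only [PySem.List.clampIdx]; split_ifs <;> omega
        rw [ha, hb, hv]
        congr 1
        omega
      show early_stop_loop v (PySem.List.enumerate (PySem.List.slice v (some ((v.length : Int) - N)) (some (-2)))) =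
        ((PySem.List.sorted (PySem.List.slice valArray (some ((n : Int) - N)) (some (-1))) fun x => x) ==
          PySem.List.slice valArray (some ((n : Int) - N)) (some (-1)))
      rw [hA, hB, Bool.eq_iff_iff]
      have hloop := early_stop_loop_spec v (v.take (m - 2)) 0
      simp only [Nat.cast_zero, Nat.zero_add] at hloop
      rw [hloop, sorted_beq_iff]
      have := adjacent_take v
      rw [hvlen] at this
      exact this
    · -- N ≤ 0: both sides vacuously true
      have hA : ∀ (w : List Int),
          PySem.List.slice w (some ((w.length : Int) - N)) (some (-2)) = [] := by
        intro w
        simp only [PySem.List.slice]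
        have ha : PySem.List.clampIdx w.length ((w.length : Int) - N) = w.length := by
          simp only [PySem.List.clampIdx]; split_ifs <;> omega
        have hb : PySem.List.clampIdx w.length (-2) ≤ w.length := by
          simp only [PySem.List.clampIdx]; split_ifs <;> omega
        rw [ha, show PySem.List.clampIdx w.length (-2) - w.length = 0 from by omega]
        simp
      have hB : PySem.List.slice valArray (some ((valArray.length : Int) - N)) (some (-1)) = [] := by
        simp only [PySem.List.slice]
        have ha : PySem.List.clampIdx valArray.length ((valArray.length : Int) - N) = valArray.length := by
          simp only [PySem.List.clampIdx]; split_ifs <;> omega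
        have hb : PySem.List.clampIdx valArray.length (-1) ≤ valArray.length := by
          simp only [PySem.List.clampIdx]; split_ifs <;> omega
        rw [ha, show PySem.List.clampIdx valArray.length (-1) - valArray.length = 0 from by omega]
        simp
      have hguard : ∀ (L : Nat), ¬ ((L : Int) < N) := by intro L; omega
      rw [if_neg (hguard _), if_neg (hguard _)]
      show early_stop_loop _ (PySem.List.enumerate (PySem.List.slice
            (valArray.drop (PySem.List.clampIdx valArray.length (-N)))
            (some (((valArray.drop (PySem.List.clampIdx valArray.length (-N))).length : Int) - N)) (some (-2)))) =
        ((PySem.List.sorted (PySem.List.slice valArray (some ((valArray.length : Int) - N)) (some (-1))) fun x => x) ==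
          PySem.List.slice valArray (some ((valArray.length : Int) - N)) (some (-1)))
      rw [hA, hB]
      simp [PySem.List.enumerate_nil, early_stop_loop]
      exact PySem.List.sorted_eq_self_of_pairwise [] _ (by simp)
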